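-- pv_equiv track=rewrite | github.com/kannix68/advent_of_code_2020 | aoc_2020.py | check_xmas_data_seq
-- ===== SOURCE A (Python) =====
-- import itertools
-- from typing import List
-- import itertools
--
-- def check_xmas_data(xmas_data: int, preamble: List[int]) -> bool:
--   preamble_len = len(preamble)
--   #log.debug("[check_xmas_data] xmas_data:", xmas_data, ", preamble_len;:", len(preamble))
--   ok = False
--   for combi in itertools.combinations(preamble, 2): # for entries no combination with itself!
--     if sum(combi) == xmas_data:
--       ok = True
--       #log.info(f"[check_xmas_data] OK: xmas-data-elem {xmas_data} is sum of prev-elems:{combi}")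
--       break
--   return ok
--
-- def check_xmas_data_seq(xmas_data_seq: List[int], preamble: List[int]) -> bool:
--   #log.debug("[check_xmas_data_seq] xmas_data_seq:", xmas_data_seq, ", preamble_len;:", len(preamble))
--   preamble_len = len(preamble)
--   all_ok = True
--   for xmas_data in xmas_data_seq:
--     #log.info(f"[check_xmas_data_seq] elem={xmas_data} preamble={pp_lst(preamble)}")
--     ok = check_xmas_data(xmas_data, preamble)
--     preamble.pop(0)
--     preamble.append(xmas_data)
--     #log.info(f"  p appended={xmas_data}, removed={remvd}, preamble={str.join(',', lmap(str, preamble))}")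
--     all_ok &= ok
--   return all_ok
-- ===== SOURCE B (Python) =====
-- def check_xmas_data_seq(xmas_data_seq, preamble):
--   # Return-value equivalent to A; also performs the same in-place sliding of `preamble`.
--   all_ok = True
--   for x in xmas_data_seq:
--     ok = False
--     seen = set()
--     for v in preamble:
--       if x - v in seen:
--         ok = True
--         break
--       seen.add(v)
--     all_ok = all_ok and ok
--     preamble.pop(0)
--     preamble.append(x)
--   return all_ok
-- ===== Notes on version B (the rewrite author's own statement) =====
-- stated objective: faster
-- what changed: Replaces the quadratic itertools.combinations scan per element with the classic one-pass two-sum using a hash set of already-seen window values.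
-- outside the precondition, e.g. on check_xmas_data_seq([1], []): A raises IndexError, B raises IndexError
import Mathlib
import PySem

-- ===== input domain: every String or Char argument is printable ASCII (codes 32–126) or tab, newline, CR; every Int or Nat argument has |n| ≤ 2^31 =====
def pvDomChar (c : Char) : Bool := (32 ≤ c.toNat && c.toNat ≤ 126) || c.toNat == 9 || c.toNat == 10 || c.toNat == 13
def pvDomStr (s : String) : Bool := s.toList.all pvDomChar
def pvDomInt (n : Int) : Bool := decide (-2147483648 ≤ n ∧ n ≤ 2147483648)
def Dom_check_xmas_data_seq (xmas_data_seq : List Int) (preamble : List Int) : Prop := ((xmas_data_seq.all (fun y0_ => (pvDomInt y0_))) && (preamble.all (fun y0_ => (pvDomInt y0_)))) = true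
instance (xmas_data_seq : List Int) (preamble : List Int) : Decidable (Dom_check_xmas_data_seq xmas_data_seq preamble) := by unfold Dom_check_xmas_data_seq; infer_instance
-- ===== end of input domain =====

-- B replaces A's per-element itertools.combinations scan (O(p^2)) with the one-pass
-- two-sum over the window using a set of seen values (O(p)); return value identical,
-- and B performs the same in-place pop/append sliding of `preamble` as A.

-- ===== PORT A =====
-- itertools.combinations(l, 2): all pairs (l[i], l[j]), i < j, in order
def pvCombs2 : List Int → List (Int × Int)
  | [] => []
  | a :: t => t.map (fun b => (a, b)) ++ pvCombs2 t

-- helper check_xmas_data: any 2-combination of the preamble sums to x (loop-with-break = any)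
def pvCheckXmasData (x : Int) (preamble : List Int) : Bool :=
  (pvCombs2 preamble).any (fun c => c.1 + c.2 == x)

def check_xmas_data_seq (xmas_data_seq : List Int) (preamble : List Int) : Bool :=
  (xmas_data_seq.foldl
    (fun (st : List Int × Bool) x =>
      let ok := pvCheckXmasData x st.1
      -- preamble.pop(0); preamble.append(x)  (Pre_ excludes the empty-window IndexError)
      (st.1.tail ++ [x], st.2 && ok))
    (preamble, true)).2

-- ===== PORT B =====
-- inner loop of Source B: scan the window once, `seen` = set of values already passed
def pvTwoSumAux (x : Int) : List Int → PySem.Set Int → Bool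
  | [], _ => false
  | v :: t, seen =>
      if PySem.Set.contains seen (x - v) then true
      else pvTwoSumAux x t (PySem.Set.add seen v)

-- outer for-loop of Source B, carrying the sliding window and the all_ok flag
def pvAltLoop (seq : List Int) (window : List Int) (all_ok : Bool) : Bool :=
  match seq with
  | [] => all_ok
  | x :: rest =>
      pvAltLoop rest (window.tail ++ [x]) (all_ok && pvTwoSumAux x window PySem.Set.empty)

def check_xmas_data_seq_alt (xmas_data_seq : List Int) (preamble : List Int) : Bool :=
  pvAltLoop xmas_data_seq preamble true

-- ===== PRECONDITION & SPEC =====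
-- Pre_ excludes only the inputs where both Pythons raise IndexError: a nonempty
-- data sequence with an empty preamble makes preamble.pop(0) fail.
def Pre_check_xmas_data_seq (xmas_data_seq : List Int) (preamble : List Int) : Prop :=
  xmas_data_seq = [] ∨ preamble ≠ []
instance (xmas_data_seq : List Int) (preamble : List Int) : Decidable (Pre_check_xmas_data_seq xmas_data_seq preamble) := by unfold Pre_check_xmas_data_seq; infer_instance

def pvWitness_check_xmas_data_seq : List Int × List Int := ([40, 62], [35, 20, 15, 25, 47])

def Spec_check_xmas_data_seq (xmas_data_seq : List Int) (preamble : List Int) (out : Bool) : Prop := out = check_xmas_data_seq_alt xmas_data_seq preamble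
instance (xmas_data_seq : List Int) (preamble : List Int) (out : Bool) : Decidable (Spec_check_xmas_data_seq xmas_data_seq preamble out) := by unfold Spec_check_xmas_data_seq; infer_instance

-- ===== CLAIM (what is proved, stated in full; the proofs are below) =====
def Claim_equal_check_xmas_data_seq : Prop := ∀ (xmas_data_seq : List Int) (preamble : List Int), Dom_check_xmas_data_seq xmas_data_seq preamble → Pre_check_xmas_data_seq xmas_data_seq preamble → Spec_check_xmas_data_seq xmas_data_seq preamble (check_xmas_data_seq xmas_data_seq preamble)

-- ===== LEMMAS AND PROOFS =====

-- unroll pvCheckXmasData over a cons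
theorem pvCheckXmasData_cons (x v : Int) (t : List Int) :
    pvCheckXmasData x (v :: t) = (t.any (fun b => v + b == x) || pvCheckXmasData x t) := by
  simp [pvCheckXmasData, pvCombs2, List.any_append, List.any_map, Function.comp_def]

-- invariant of the two-sum scan: it succeeds iff some window value's complement is in
-- `seen`, or some ordered pair of window values sums to x (= A's combinations check)
theorem pvTwoSumAux_iff (x : Int) (l : List Int) (seen : PySem.Set Int) :
    pvTwoSumAux x l seen = true ↔
      (∃ v ∈ l, PySem.Set.contains seen (x - v) = true) ∨ pvCheckXmasData x l = true := by
  induction l generalizing seen with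
  | nil => simp [pvTwoSumAux, pvCheckXmasData, pvCombs2]
  | cons v t ih =>
    rw [pvCheckXmasData_cons]
    simp only [pvTwoSumAux]
    by_cases h : PySem.Set.contains seen (x - v) = true
    · rw [if_pos h]
      constructor
      · intro _; exact Or.inl ⟨v, List.mem_cons_self, h⟩
      · intro _; rfl
    · rw [if_neg h, ih]
      constructor
      · rintro (⟨u, hu, hc⟩ | hp)
        · have hmem := List.mem_of_elem_eq_true hc
          rw [PySem.Set.mem_add] at hmem
          rcases hmem with hin | heq
          · exact Or.inl ⟨u, List.mem_cons_of_mem v hu, List.elem_eq_true_of_mem hin⟩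
          · have hx : v + u = x := by omega
            have hany : t.any (fun b => v + b == x) = true :=
              List.any_eq_true.mpr ⟨u, hu, by simp [hx]⟩
            exact Or.inr (by simp [hany])
        · exact Or.inr (by simp [hp])
      · rintro (⟨u, hu, hc⟩ | hp)
        · rcases List.mem_cons.mp hu with rfl | hu'
          · exact absurd hc h
          · refine Or.inl ⟨u, hu', ?_⟩
            apply List.elem_eq_true_of_mem; rw [PySem.Set.mem_add]
            exact Or.inl (List.mem_of_elem_eq_true hc)
        · by_cases ha : t.any (fun b => v + b == x) = true
          · rcases List.any_eq_true.mp ha with ⟨u, hu', he⟩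
            have hx : v + u = x := by simpa using he
            refine Or.inl ⟨u, hu', ?_⟩
            apply List.elem_eq_true_of_mem; rw [PySem.Set.mem_add]
            exact Or.inr (by omega)
          · have hp' : pvCheckXmasData x t = true := by
              cases hq : pvCheckXmasData x t with
              | true => rfl
              | false => rw [hq, Bool.or_false] at hp; exact absurd hp ha
            exact Or.inr hp'

-- starting from the empty `seen`, B's inner scan equals A's combinations check
theorem pvTwoSumAux_eq (x : Int) (l : List Int) :
    pvTwoSumAux x l PySem.Set.empty = pvCheckXmasData x l := by
  have h := pvTwoSumAux_iff x l PySem.Set.empty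
  have h2 : pvTwoSumAux x l PySem.Set.empty = true ↔ pvCheckXmasData x l = true := by
    rw [h]
    constructor
    · rintro (⟨v, _, hv⟩ | hp)
      · exact absurd (List.mem_of_elem_eq_true hv) (List.not_mem_nil)
      · exact hp
    · exact Or.inr
  cases ha : pvTwoSumAux x l PySem.Set.empty <;> cases hb : pvCheckXmasData x l <;> simp_all

-- the two outer loops coincide for every window and accumulator
theorem loops_eq (seq : List Int) (window : List Int) (acc : Bool) :
    (seq.foldl
      (fun (st : List Int × Bool) x =>
        let ok := pvCheckXmasData x st.1
        (st.1.tail ++ [x], st.2 && ok))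
      (window, acc)).2 = pvAltLoop seq window acc := by
  induction seq generalizing window acc with
  | nil => rfl
  | cons x rest ih =>
    simp only [List.foldl_cons, pvAltLoop]
    rw [pvTwoSumAux_eq]
    exact ih _ _

-- ===== VERDICT (by name: the statement is the Claim_ definition above) =====
theorem check_xmas_data_seq_spec : Claim_equal_check_xmas_data_seq := by
  intro seq preamble _ _
  unfold Spec_check_xmas_data_seq check_xmas_data_seq check_xmas_data_seq_alt
  exact loops_eq seq preamble true
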